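-- pv_equiv track=rewrite | github.com/egort/mdv-fancoil-agent | mqtt_rs485_agent.py | _decode_error_bits
-- ===== SOURCE A (Python) =====
-- def _decode_error_bits(high: int, low: int, prefix: str) -> list[str]:
--     codes = []
--     for bit in range(8):
--         if high & (1 << bit):
--             codes.append(f"{prefix}{bit}")
--     for bit in range(8):
--         if low & (1 << bit):
--             codes.append(f"{prefix}{8 + bit}")
--     return codes
-- ===== SOURCE B (Python) =====
-- def _decode_error_bits(high: int, low: int, prefix: str) -> list[str]:
--     combined = (high & 0xFF) | ((low & 0xFF) << 8)
--     codes = []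
--     bit = 0
--     while combined:
--         if combined & 1:
--             codes.append(f"{prefix}{bit}")
--         combined >>= 1
--         bit += 1
--     return codes
-- ===== Notes on version B (the rewrite author's own statement) =====
-- stated objective: alternative
-- what changed: Instead of A's two fixed 8-iteration for-loops each testing high/low against 1<<bit, B folds both bytes into a single 16-bit mask and consumes it with one while-loop that tests the low bit and right-shifts, stopping as soon as no set bits remain.
import Mathlib
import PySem

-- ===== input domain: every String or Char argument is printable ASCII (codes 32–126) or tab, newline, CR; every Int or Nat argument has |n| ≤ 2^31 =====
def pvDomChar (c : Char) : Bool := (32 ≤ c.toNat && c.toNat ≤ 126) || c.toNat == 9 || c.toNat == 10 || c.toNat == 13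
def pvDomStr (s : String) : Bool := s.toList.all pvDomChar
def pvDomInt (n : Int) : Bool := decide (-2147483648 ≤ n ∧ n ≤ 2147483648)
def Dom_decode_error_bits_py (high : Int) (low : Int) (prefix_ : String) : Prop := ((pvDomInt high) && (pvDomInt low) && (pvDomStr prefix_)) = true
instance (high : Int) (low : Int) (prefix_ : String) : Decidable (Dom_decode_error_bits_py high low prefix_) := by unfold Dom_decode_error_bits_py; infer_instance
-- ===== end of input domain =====

-- B replaces A's two fixed 8-iteration mask-test loops by one 16-bit combined mask consumed
-- with a single test-low-bit-and-shift loop (objective: alternative decomposition, same cost).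

-- ===== PORT A =====
-- literal port of A: two for-loops over range(8); `1 << bit` with bit ∈ range(8) nonnegative,
-- so the shift amount is bit.toNat (exact here since 0 ≤ bit).
def decode_error_bits_py (high : Int) (low : Int) (prefix_ : String) : List String :=
  let codes : List String :=
    (PySem.List.pyRange 0 8 1).foldl
      (fun codes bit =>
        if PySem.Int.band high ((1 : Int) <<< bit.toNat) ≠ 0 then
          codes ++ [prefix_ ++ PySem.Int.toStr bit]
        else codes) []
  (PySem.List.pyRange 0 8 1).foldl
    (fun codes bit =>
      if PySem.Int.band low ((1 : Int) <<< bit.toNat) ≠ 0 then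
        codes ++ [prefix_ ++ PySem.Int.toStr (8 + bit)]
      else codes) codes

-- ===== PORT B =====
-- the `while combined:` loop of Source B; emits the code if the low bit is set, then shifts right
def pvWalkBits (prefix_ : String) (m : Nat) (bit : Int) : List String :=
  if hm0 : m = 0 then []
  else
    (if m &&& 1 ≠ 0 then [prefix_ ++ PySem.Int.toStr bit] else []) ++
      pvWalkBits prefix_ (m >>> 1) (bit + 1)
termination_by m
decreasing_by simpa [Nat.shiftRight_one] using Nat.div_lt_self (Nat.pos_of_ne_zero hm0) one_lt_two

def decode_error_bits_py_alt (high : Int) (low : Int) (prefix_ : String) : List String :=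
  -- combined = (high & 0xFF) | ((low & 0xFF) << 8): a nonnegative 16-bit mask,
  -- carried as a Nat (exact: the value is proved nonnegative below)
  let combined : Nat :=
    (PySem.Int.bor (PySem.Int.band high 255) ((PySem.Int.band low 255) <<< (8 : Nat))).toNat
  pvWalkBits prefix_ combined 0

-- ===== PRECONDITION & SPEC =====
def Spec_decode_error_bits_py (high : Int) (low : Int) (prefix_ : String) (out : List String) : Prop := out = decode_error_bits_py_alt high low prefix_
instance (high : Int) (low : Int) (prefix_ : String) (out : List String) : Decidable (Spec_decode_error_bits_py high low prefix_ out) := by unfold Spec_decode_error_bits_py; infer_instance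

-- ===== CLAIM (what is proved, stated in full; the proofs are below) =====
def Claim_equal_decode_error_bits_py : Prop := ∀ (high : Int) (low : Int) (prefix_ : String), Dom_decode_error_bits_py high low prefix_ → Spec_decode_error_bits_py high low prefix_ (decode_error_bits_py high low prefix_)

-- ===== LEMMAS AND PROOFS =====

lemma pvFoldl_if_append (c : Int → Prop) [DecidablePred c] (f : Int → String)
    (l : List Int) (acc : List String) :
    l.foldl (fun a b => if c b then a ++ [f b] else a) acc
      = acc ++ (l.filter (fun b => decide (c b))).map f := by
  induction l generalizing acc with
  | nil => simp
  | cons x t ih =>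
      by_cases hc : c x <;> simp [List.foldl_cons, hc, ih]

lemma pvWalkBits_eq (p : String) (N : Nat) : ∀ (m : Nat) (b : Int), m < 2 ^ N →
    pvWalkBits p m b
      = ((List.range N).filter (fun i => m.testBit i)).map
          (fun i : Nat => p ++ PySem.Int.toStr (b + (i : Int))) := by
  induction N with
  | zero =>
      intro m b hm
      interval_cases m
      rw [pvWalkBits]
      simp
  | succ N ih =>
      intro m b hm
      by_cases h0 : m = 0
      · subst h0
        rw [pvWalkBits]
        simp [Nat.zero_testBit]
      · rw [pvWalkBits]
        have hdiv : m >>> 1 < 2 ^ N := by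
          rw [Nat.shiftRight_one]
          rw [pow_succ] at hm
          omega
        rw [ih (m >>> 1) (b + 1) hdiv]
        have hbit0 : (m &&& 1 ≠ 0) ↔ m.testBit 0 = true := by
          rw [Nat.and_one_is_mod, Nat.testBit_zero]
          simp only [decide_eq_true_eq]
          omega
        have hcond : (fun i => (m >>> 1).testBit i) = ((fun i => m.testBit i) ∘ Nat.succ) := by
          funext i
          simp [Function.comp, Nat.shiftRight_one, Nat.testBit_succ]
        have hshift :
            List.map (fun i : Nat => p ++ PySem.Int.toStr (b + 1 + (i : Int)))
                (List.filter (fun i => (m >>> 1).testBit i) (List.range N))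
              = List.map (fun i : Nat => p ++ PySem.Int.toStr (b + (i : Int)))
                  (List.map Nat.succ
                    (List.filter ((fun i => m.testBit i) ∘ Nat.succ) (List.range N))) := by
          rw [hcond, List.map_map]
          apply List.map_congr_left
          intro i _
          simp only [Function.comp]
          congr 2
          push_cast
          ring
        rw [List.range_succ_eq_map, List.filter_cons, List.filter_map]
        simp only [dif_neg h0, hshift]
        by_cases hb : m.testBit 0 = true
        · rw [if_pos hb, if_pos (hbit0.mpr hb), List.map_cons]
          simp
        · rw [if_neg hb, if_neg (by simpa [hbit0] using hb)]
          simp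

set_option maxRecDepth 8192 in
lemma pvByteCompl : ∀ r < 256, ∀ k < 8, (255 - r).testBit k = !(r.testBit k) := by decide

lemma pvBand255_nonneg (a : Int) : 0 ≤ PySem.Int.band a 255 := by
  unfold PySem.Int.band
  split_ifs with h1 h2 h2 <;> first
    | exact Int.natCast_nonneg _
    | omega

lemma pvBand255_lt (a : Int) : (PySem.Int.band a 255).toNat < 256 := by
  unfold PySem.Int.band
  split_ifs with h1 h2 h2 <;> simp_all
  · have := Nat.and_le_right (n := a.toNat) (m := (255 : Int).toNat)
    simp at this
    omega
  · omega

lemma pvTestBit255 (k : Nat) (hk : k < 8) : Nat.testBit 255 k = true := by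
  interval_cases k <;> decide

lemma pvNatBandPow (n k : Nat) : (n &&& 2 ^ k ≠ 0) ↔ n.testBit k = true := by
  rw [Nat.and_two_pow]
  cases h : n.testBit k <;> simp

lemma pvBandBit (a : Int) (k : Nat) (hk : k < 8) :
    (PySem.Int.band a ((1 : Int) <<< k) ≠ 0) ↔
      ((PySem.Int.band a 255).toNat).testBit k = true := by
  have hshl : ((1 : Int) <<< k) = ((2 ^ k : Nat) : Int) := by
    rw [Int.shiftLeft_eq]
    push_cast
    ring
  rw [hshl]
  unfold PySem.Int.band
  have hp : (0 : Int) ≤ ((2 ^ k : Nat) : Int) := Int.natCast_nonneg _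
  split_ifs with h1 h2 h2 <;> try omega
  · -- 0 ≤ a
    simp only [Int.toNat_natCast, ne_eq, Int.natCast_eq_zero]
    rw [show Int.toNat 255 = 255 from rfl, Nat.testBit_and, pvTestBit255 k hk, Bool.and_true]
    exact pvNatBandPow a.toNat k
  · -- a < 0
    simp only [Int.toNat_natCast, ne_eq, Int.natCast_eq_zero]
    rw [show Int.toNat 255 = 255 from rfl]
    have h255n : 255 &&& (-a - 1).toNat = (-a - 1).toNat % 256 := by
      rw [Nat.and_comm, show (255 : Nat) = 2 ^ 8 - 1 by norm_num,
        Nat.and_two_pow_sub_one_eq_mod]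
    rw [h255n]
    have hcompl := pvByteCompl ((-a - 1).toNat % 256) (Nat.mod_lt _ (by norm_num)) k hk
    have hmod : ((-a - 1).toNat % 256).testBit k = (-a - 1).toNat.testBit k := by
      rw [show (256 : Nat) = 2 ^ 8 by norm_num, Nat.testBit_mod_two_pow]
      simp [hk]
    rw [hcompl, hmod, Nat.two_pow_and]
    cases hn : (-a - 1).toNat.testBit k <;> simp

lemma pvDecideBandBit (a : Int) (k : Nat) (hk : k < 8) :
    (decide (PySem.Int.band a ((1 : Int) <<< ((k : Nat) : Int)) ≠ 0))
      = ((PySem.Int.band a 255).toNat).testBit k := by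
  rw [Int.shiftLeft_natCast_right]
  by_cases h : PySem.Int.band a ((1 : Int) <<< k) ≠ 0
  · simp [h, (pvBandBit a k hk).mp h]
  · have hb : ((PySem.Int.band a 255).toNat).testBit k = false := by
      cases hx : ((PySem.Int.band a 255).toNat).testBit k
      · rfl
      · exact absurd ((pvBandBit a k hk).mpr hx) h
    simp [h, hb]

theorem pv_main (high low : Int) (p : String) :
    decode_error_bits_py high low p = decode_error_bits_py_alt high low p := by
  simp only [decode_error_bits_py, decode_error_bits_py_alt]
  set hN := (PySem.Int.band high 255).toNat with hhN
  set lN := (PySem.Int.band low 255).toNat with hlN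
  have hH : PySem.Int.band high 255 = (hN : Int) :=
    (Int.toNat_of_nonneg (pvBand255_nonneg high)).symm
  have hL : PySem.Int.band low 255 = (lN : Int) :=
    (Int.toNat_of_nonneg (pvBand255_nonneg low)).symm
  have hcomb : (PySem.Int.bor (PySem.Int.band high 255) ((PySem.Int.band low 255) <<< (8 : Nat))).toNat
      = hN ||| (lN <<< 8) := by
    rw [hH, hL, ← Int.natCast_shiftLeft, PySem.Int.bor_natCast, Int.toNat_natCast]
  have hlt : hN ||| (lN <<< 8) < 2 ^ 16 := by
    have h1 : hN < 2 ^ 16 := lt_of_lt_of_le (pvBand255_lt high) (by norm_num)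
    have h2 : lN <<< 8 < 2 ^ 16 := by
      rw [Nat.shiftLeft_eq]
      have h3 := pvBand255_lt low
      norm_num
      omega
    exact Nat.or_lt_two_pow h1 h2
  rw [hcomb, pvWalkBits_eq p 16 _ 0 hlt]
  -- A side: the two conditional-append folds become map-over-filter
  rw [pvFoldl_if_append (fun bit => PySem.Int.band high ((1 : Int) <<< ((bit.toNat : Nat) : Int)) ≠ 0)
      (fun bit => p ++ PySem.Int.toStr bit),
    pvFoldl_if_append (fun bit => PySem.Int.band low ((1 : Int) <<< ((bit.toNat : Nat) : Int)) ≠ 0)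
      (fun bit => p ++ PySem.Int.toStr (8 + bit))]
  rw [PySem.List.pyRange_one, show ((8 : Int) - 0).toNat = 8 from rfl]
  rw [List.filter_map, List.filter_map, List.map_map, List.map_map]
  -- B side: split range 16 into the low and high byte
  rw [show (16 : Nat) = 8 + 8 from rfl, List.range_add, List.filter_append,
    List.map_append, List.filter_map, List.map_map]
  simp only [List.nil_append]
  congr 1
  · -- low byte: bits 0..7 come from high
    rw [List.filter_congr (q := fun i => Nat.testBit (hN ||| lN <<< 8) i)
      (fun i hi => by
        have hi8 : i < 8 := List.mem_range.mp hi
        simp only [Function.comp]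
        rw [show ((0 : Int) + (i : Int)).toNat = i by simp]
        rw [pvDecideBandBit high i hi8, ← hhN]
        rw [Nat.testBit_lor, Nat.testBit_shiftLeft]
        simp [Nat.not_le.mpr hi8])]
    apply List.map_congr_left
    intro i _
    simp [Function.comp]
  · -- high byte: bits 8..15 come from low
    rw [List.filter_congr (q := fun i => Nat.testBit (hN ||| lN <<< 8) (8 + i))
      (fun i hi => by
        have hi8 : i < 8 := List.mem_range.mp hi
        simp only [Function.comp]
        rw [show ((0 : Int) + (i : Int)).toNat = i by simp]
        rw [pvDecideBandBit low i hi8, ← hlN]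
        rw [Nat.testBit_lor, Nat.testBit_shiftLeft]
        have h256 : (256 : Nat) ≤ 2 ^ (8 + i) := by
          calc (256 : Nat) = 2 ^ 8 := by norm_num
            _ ≤ 2 ^ (8 + i) := Nat.pow_le_pow_right (by norm_num) (by omega)
        have hhi : hN.testBit (8 + i) = false :=
          Nat.testBit_lt_two_pow (lt_of_lt_of_le (pvBand255_lt high) h256)
        simp [hhi])]
    apply List.map_congr_left
    intro i _
    simp only [Function.comp]
    congr 2
    push_cast
    ring

-- ===== VERDICT (by name: the statement is the Claim_ definition above) =====
theorem decode_error_bits_py_spec : Claim_equal_decode_error_bits_py := by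
  intro high low prefix_ _
  exact pv_main high low prefix_
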